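-- pv_equiv track=rewrite | github.com/tracyvierra/vigilant-pancake | For Fun/analysis/analysis.py | get_x_and_y
-- ===== SOURCE A (Python) =====
-- def get_x_and_y(tokens):
--     first = tokens[0]
--     x = [1 for token in tokens if token == "x"]
--     if len(x) == 0:
--         y = [0 for token in tokens]
--     else:
--         x = [0 for token in x]
--         y = [0 for token in tokens if token != "x"]
--     return x, y
-- ===== SOURCE B (Python) =====
-- def get_x_and_y(tokens):
--     first = tokens[0]
--     xs, ys = [], []
--     for token in tokens:
--         if token == "x":
--             xs.append(0)
--         else:
--             ys.append(0)
--     return xs, ys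
-- ===== Notes on version B (the rewrite author's own statement) =====
-- stated objective: simpler
-- what changed: B partitions the tokens in ONE pass with two output accumulators, appending 0 to xs or ys as it goes, instead of A's three separate conditional comprehension passes and the len(x)==0 branch (which collapses to the same result because a zero-length y-filter pass equals the full map when there are no 'x' tokens).
import Mathlib
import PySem

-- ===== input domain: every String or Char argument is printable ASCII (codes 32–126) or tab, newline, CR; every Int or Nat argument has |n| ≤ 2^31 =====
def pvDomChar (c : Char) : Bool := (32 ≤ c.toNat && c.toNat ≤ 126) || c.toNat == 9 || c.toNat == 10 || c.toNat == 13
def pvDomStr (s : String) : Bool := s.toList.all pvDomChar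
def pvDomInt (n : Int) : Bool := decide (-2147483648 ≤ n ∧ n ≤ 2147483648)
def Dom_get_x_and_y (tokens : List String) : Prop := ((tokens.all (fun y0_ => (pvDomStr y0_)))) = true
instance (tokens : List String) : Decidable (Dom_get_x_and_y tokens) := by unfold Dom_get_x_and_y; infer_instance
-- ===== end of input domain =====

-- B partitions the tokens in one pass with two accumulators (xs/ys) instead of A's three
-- conditional comprehension passes and the len(x)==0 branch (simpler decomposition, same O(n)).
-- A mutates nothing; equivalence is about the return value.
-- ===== PORT A =====
def get_x_and_y (tokens : List String) : List Int × List Int :=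
  -- first = tokens[0] only raises IndexError on []; excluded by Pre_
  let x : List Int := (tokens.filter (fun token => token == "x")).map (fun _ => (1 : Int))
  if x.length = 0 then
    let y : List Int := tokens.map (fun _ => (0 : Int))
    (x, y)
  else
    let x' : List Int := x.map (fun _ => (0 : Int))
    let y : List Int := (tokens.filter (fun token => token != "x")).map (fun _ => (0 : Int))
    (x', y)

-- ===== PORT B =====
-- single pass: fold over the tokens, appending 0 to xs or ys
def get_x_and_y_alt (tokens : List String) : List Int × List Int :=
  tokens.foldl
    (fun (acc : List Int × List Int) token =>
      if token == "x" then (acc.1 ++ [(0 : Int)], acc.2) else (acc.1, acc.2 ++ [(0 : Int)]))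
    ([], [])

-- ===== PRECONDITION & SPEC =====
-- Pre_ excludes only the empty list, where A raises IndexError on tokens[0].
def Pre_get_x_and_y (tokens : List String) : Prop := tokens ≠ []
instance (tokens : List String) : Decidable (Pre_get_x_and_y tokens) := by unfold Pre_get_x_and_y; infer_instance
def pvWitness_get_x_and_y : List String := ["x", "y"]
def Spec_get_x_and_y (tokens : List String) (out : List Int × List Int) : Prop := out = get_x_and_y_alt tokens
instance (tokens : List String) (out : List Int × List Int) : Decidable (Spec_get_x_and_y tokens out) := by unfold Spec_get_x_and_y; infer_instance

-- ===== CLAIM =====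
def Claim_equal_get_x_and_y : Prop := ∀ (tokens : List String), Dom_get_x_and_y tokens → Pre_get_x_and_y tokens → Spec_get_x_and_y tokens (get_x_and_y tokens)

-- ===== LEMMAS AND PROOFS =====
-- B's fold, started from any accumulators, appends the two filter-maps.
theorem alt_fold_char (l : List String) (xs ys : List Int) :
    l.foldl
      (fun (acc : List Int × List Int) token =>
        if token == "x" then (acc.1 ++ [(0 : Int)], acc.2) else (acc.1, acc.2 ++ [(0 : Int)]))
      (xs, ys)
    = (xs ++ (l.filter (fun token => token == "x")).map (fun _ => (0 : Int)),
       ys ++ (l.filter (fun token => token != "x")).map (fun _ => (0 : Int))) := by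
  induction l generalizing xs ys with
  | nil => simp
  | cons a t ih =>
    by_cases h : a = "x"
    · rw [List.foldl_cons, if_pos (by simp [h]), ih]
      simp [h]
    · rw [List.foldl_cons, if_neg (by simp [h]), ih]
      simp [h]

theorem filter_eq_nil_of_count_zero (l : List String)
    (h : (l.filter (fun token => token == "x")) = []) :
    l.filter (fun token => token != "x") = l :=
  List.filter_eq_self.mpr (fun a ha => by
    have := List.filter_eq_nil_iff.mp h a ha
    simpa using this)

-- ===== VERDICT =====
theorem get_x_and_y_spec : Claim_equal_get_x_and_y := by
  intro tokens _ _
  unfold Spec_get_x_and_y get_x_and_y get_x_and_y_alt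
  rw [alt_fold_char]
  by_cases h : ((tokens.filter (fun token => token == "x")).map (fun _ => (1 : Int))).length = 0
  · have hnil : tokens.filter (fun token => token == "x") = [] := by
      simp only [List.length_map] at h
      exact List.length_eq_zero_iff.mp h
    rw [if_pos h]
    simp [hnil, filter_eq_nil_of_count_zero tokens hnil]
  · rw [if_neg h]
    simp
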